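-- pv_equiv track=rewrite | github.com/StarSein/BaekJoon | 백준/Gold/14578. 영훈이의 색칠공부/영훈이의 색칠공부.py | solution
-- ===== SOURCE A (Python) =====
-- def solution(N: int) -> int:
--     MOD = int(1e9) + 7
--     if N == 1:
--         return 0
--     if N == 2:
--         return 2
--
--     case_red = 1
--     for i in range(N, 1, -1):
--         case_red = (case_red * i) % MOD
--
--     A = [0 for _ in range(N + 1)]
--     B = [0 for _ in range(N + 1)]
--     A[2] = 1
--     B[2] = 1
--     for i in range(2, N):
--         A[i + 1] = (i * A[i] + B[i]) % MOD
--         B[i + 1] = (i * A[i]) % MOD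
--     case_blue = B[N]
--
--     return (case_red * case_blue) % MOD
-- ===== SOURCE B (Python) =====
-- def solution(N: int) -> int:
--     MOD = 10**9 + 7
--     if N == 1:
--         return 0
--     if N == 2:
--         return 2
--     # One fused pass using the first-order identity D(n) = n*D(n-1) + (-1)^n:
--     # fact = n! mod MOD, d = D(n) mod MOD, sign = (-1)^n, starting at n = 2.
--     fact, d, sign = 2, 1, 1
--     for n in range(3, N + 1):
--         fact = (fact * n) % MOD
--         sign = -sign
--         d = (n * d + sign) % MOD
--     return (fact * d) % MOD
-- ===== Notes on version B (the rewrite author's own statement) =====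
-- stated objective: alternative
-- what changed: Replaces A's paired second-order A/B array recurrence with the first-order derangement identity D(n)=n*D(n-1)+(-1)^n, fusing factorial, alternating sign and derangement into one single loop over three scalars instead of A's two staged loops over two O(N) arrays (no list allocation or indexing).
-- outside the precondition, e.g. on solution(0): A raises IndexError, B returns 2; on solution(-1): A raises IndexError, B returns 2
import Mathlib
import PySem

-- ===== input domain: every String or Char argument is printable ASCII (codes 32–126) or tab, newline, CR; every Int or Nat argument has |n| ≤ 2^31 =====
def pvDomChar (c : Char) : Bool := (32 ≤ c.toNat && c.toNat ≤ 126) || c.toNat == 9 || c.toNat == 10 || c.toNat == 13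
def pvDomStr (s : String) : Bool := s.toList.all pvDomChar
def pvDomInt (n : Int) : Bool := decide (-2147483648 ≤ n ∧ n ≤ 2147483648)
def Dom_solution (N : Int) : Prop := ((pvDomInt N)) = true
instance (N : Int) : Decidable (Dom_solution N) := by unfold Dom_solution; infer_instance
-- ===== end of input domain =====

-- B replaces A's paired second-order A/B array recurrence by the first-order identity
-- D(n)=n*D(n-1)+(-1)^n, fused with the factorial into one loop over three scalars;
-- Pre_ excludes N <= 0, where Python A raises IndexError.


-- ===== PORT A =====
-- Python's mutable lists A and B are ported as Array Int updated in place; every index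
-- used (2, i, i+1, N with 2 ≤ i < N) is nonnegative and < N+1 = size under Pre_, where
-- Array.getD i.toNat / Array.setIfInBounds i.toNat are exact for A[i] read / assignment.
def solution (N : Int) : Int :=
  let M : Int := 1000000007
  if N = 1 then 0
  else if N = 2 then 2
  else
    let case_red :=
      (PySem.List.pyRange N 1 (-1)).foldl (fun c i => PySem.Int.mod (c * i) M) 1
    let A0 : Array Int := ((PySem.List.pyRange 0 (N + 1) 1).map (fun _ => 0)).toArray
    let B0 : Array Int := ((PySem.List.pyRange 0 (N + 1) 1).map (fun _ => 0)).toArray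
    let A1 := A0.setIfInBounds 2 1
    let B1 := B0.setIfInBounds 2 1
    let st :=
      (PySem.List.pyRange 2 N 1).foldl
        (fun (st : Array Int × Array Int) i =>
          let a := st.1.getD i.toNat 0
          let b := st.2.getD i.toNat 0
          (st.1.setIfInBounds (i + 1).toNat (PySem.Int.mod (i * a + b) M),
           st.2.setIfInBounds (i + 1).toNat (PySem.Int.mod (i * a) M)))
        (A1, B1)
    let case_blue := st.2.getD N.toNat 0
    PySem.Int.mod (case_red * case_blue) M

-- ===== PORT B =====
-- one fused loop over the scalar triple (fact, d, sign), updated in Source B's order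
def solution_alt (N : Int) : Int :=
  let M : Int := 1000000007
  if N = 1 then 0
  else if N = 2 then 2
  else
    let st :=
      (PySem.List.pyRange 3 (N + 1) 1).foldl
        (fun (s : Int × Int × Int) n =>
          let fact := PySem.Int.mod (s.1 * n) M
          let sign := - s.2.2
          let d := PySem.Int.mod (n * s.2.1 + sign) M
          (fact, d, sign))
        (2, 1, 1)
    PySem.Int.mod (st.1 * st.2.1) M

-- ===== PRECONDITION & SPEC =====
-- Pre_ excludes N ≤ 0, on which Python A raises IndexError (A[2] on a list shorter than 3).
def Pre_solution (N : Int) : Prop := 1 ≤ N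
instance (N : Int) : Decidable (Pre_solution N) := by unfold Pre_solution; infer_instance
def pvWitness_solution : Int := (5)

def Spec_solution (N : Int) (out : Int) : Prop := out = solution_alt N
instance (N : Int) (out : Int) : Decidable (Spec_solution N out) := by unfold Spec_solution; infer_instance

-- ===== CLAIM (what is proved, stated in full; the proofs are below) =====
def Claim_equal_solution : Prop := ∀ (N : Int), Dom_solution N → Pre_solution N → Spec_solution N (solution N)

-- ===== LEMMAS AND PROOFS =====

-- the shared modulus
def pvM : Int := 1000000007

-- A's second-order sequence B[n] (mod pvM)
def Bm : Nat → Int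
  | 0 => 0
  | 1 => 0
  | 2 => 1
  | (n + 3) => ((((n : Int) + 2) * (Bm (n + 2) + Bm (n + 1))) % pvM)

-- B's first-order derangement sequence D(n) = n*D(n-1) + (-1)^n (mod pvM)
def Dm : Nat → Int
  | 0 => 1
  | (n + 1) => ((((n : Int) + 1) * Dm n + (-1) ^ (n + 1)) % pvM)

-- B's factorial-mod sequence
def Fm : Nat → Int
  | 0 => 1
  | (n + 1) => ((Fm n * ((n : Int) + 1)) % pvM)

lemma modM_add_left (u v : Int) : (u % pvM + v) % pvM = (u + v) % pvM :=
  Int.emod_add_emod u pvM v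

lemma modM_mul_right (c x : Int) : (c * (x % pvM)) % pvM = (c * x) % pvM := by
  conv_rhs => rw [Int.mul_emod, Int.emod_emod_of_dvd x dvd_rfl |>.symm, ← Int.mul_emod]

lemma modM_mul_left (x c : Int) : ((x % pvM) * c) % pvM = (x * c) % pvM := by
  rw [mul_comm, modM_mul_right, mul_comm]

lemma mod_eq (x : Int) : PySem.Int.mod x pvM = x % pvM :=
  PySem.Int.mod_eq_emod_of_pos (by norm_num [pvM])

-- a nonempty mulmod fold computes (a * product) % M
lemma foldl_mulmod (l : List Int) (a : Int) (h : l ≠ []) :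
    l.foldl (fun c i => PySem.Int.mod (c * i) pvM) a = (a * l.prod) % pvM := by
  induction l generalizing a with
  | nil => exact absurd rfl h
  | cons i t ih =>
    simp only [List.foldl_cons, List.prod_cons]
    rcases t with _ | ⟨j, t'⟩
    · simp [mod_eq]
    · rw [ih _ (by simp), mod_eq, ← mul_assoc]
      conv_rhs => rw [Int.mul_emod, Int.emod_emod_of_dvd (a*i) dvd_rfl |>.symm, ← Int.mul_emod]

-- Fm n is (product of 2..n) % pvM, for n ≥ 1
lemma Fm_eq_prod (n : Nat) (hn : 1 ≤ n) :
    Fm n = (PySem.List.pyRange 2 ((n : Int) + 1) 1).prod % pvM := by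
  induction n with
  | zero => omega
  | succ k ih =>
    rcases Nat.eq_zero_or_pos k with h | h
    · subst h
      rw [show ((1 : Nat) : Int) + 1 = 2 by norm_num, PySem.List.pyRange_one_eq_nil le_rfl]
      norm_num [Fm, pvM]
    · have hk : 1 ≤ k := h
      rw [show ((k + 1 : Nat) : Int) + 1 = ((k : Int) + 1) + 1 by push_cast; ring,
        PySem.List.pyRange_one_succ_right (a := 2) (b := (k : Int) + 1) (by omega),
        List.prod_append, List.prod_cons, List.prod_nil, mul_one]
      show (Fm k * ((k : Int) + 1)) % pvM = _
      rw [ih hk, modM_mul_left]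

-- the first-order recurrence satisfies A's second-order recurrence
lemma Dm_second_order (n : Nat) :
    Dm (n + 3) = (((n : Int) + 2) * (Dm (n + 2) + Dm (n + 1))) % pvM := by
  have hD : Dm (n + 2) = (((n : Int) + 2) * Dm (n + 1) + (-1) ^ (n + 2)) % pvM := by
    show ((((n + 1 : Nat) : Int) + 1) * Dm (n + 1) + (-1) ^ (n + 1 + 1)) % pvM = _
    push_cast; ring_nf
  have hc : Int.ModEq pvM (Dm (n + 2)) (((n : Int) + 2) * Dm (n + 1) + (-1) ^ (n + 2)) := by
    rw [hD]; exact Int.emod_emod_of_dvd _ dvd_rfl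
  have hL : Dm (n + 3) = (((n : Int) + 3) * Dm (n + 2) + (-1) ^ (n + 3)) % pvM := by
    show ((((n + 2 : Nat) : Int) + 1) * Dm (n + 2) + (-1) ^ (n + 2 + 1)) % pvM = _
    push_cast; ring_nf
  rw [hL]
  have hsplit : ((n : Int) + 3) * Dm (n + 2) + (-1) ^ (n + 3)
      = ((n : Int) + 2) * Dm (n + 2) + (Dm (n + 2) - (-1) ^ (n + 2)) := by
    have : ((-1 : Int)) ^ (n + 3) = -((-1) ^ (n + 2)) := by rw [pow_succ]; ring
    rw [this]; ring
  have h2 : Int.ModEq pvM (Dm (n + 2) - (-1) ^ (n + 2)) (((n : Int) + 2) * Dm (n + 1)) := by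
    have := hc.sub_right ((-1 : Int) ^ (n + 2))
    simpa using this
  have h3 : Int.ModEq pvM (((n : Int) + 3) * Dm (n + 2) + (-1) ^ (n + 3))
      (((n : Int) + 2) * (Dm (n + 2) + Dm (n + 1))) := by
    rw [hsplit, mul_add]
    exact (Int.ModEq.refl _).add h2
  exact h3

-- hence the two sequences agree from index 1 on
lemma Bm_eq_Dm (n : Nat) : Bm (n + 1) = Dm (n + 1) ∧ Bm (n + 2) = Dm (n + 2) := by
  induction n with
  | zero =>
    exact ⟨by decide, by decide⟩
  | succ k ih =>
    refine ⟨ih.2, ?_⟩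
    show Bm (k + 3) = Dm (k + 3)
    rw [show Bm (k + 3) = ((((k : Nat) : Int) + 2) * (Bm (k + 2) + Bm (k + 1))) % pvM from rfl,
      ih.1, ih.2, ← Dm_second_order]

-- the rolling sign stays (-1)^n and is ±1
lemma fused_fold (m : Nat) :
    (PySem.List.pyRange 3 ((m : Int) + 4) 1).foldl
      (fun (s : Int × Int × Int) n =>
        let fact := PySem.Int.mod (s.1 * n) pvM
        let sign := - s.2.2
        let d := PySem.Int.mod (n * s.2.1 + sign) pvM
        (fact, d, sign))
      (2, 1, 1)
    = (Fm (m + 3), Dm (m + 3), (-1) ^ (m + 3)) := by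
  induction m with
  | zero =>
    rw [show ((0 : Nat) : Int) + 4 = 3 + 1 by norm_num,
      PySem.List.pyRange_one_succ_right (by norm_num), PySem.List.pyRange_one_eq_nil le_rfl]
    simp only [List.nil_append, List.foldl_cons, List.foldl_nil]
    refine Prod.ext ?_ (Prod.ext ?_ ?_)
    · show PySem.Int.mod (2 * 3) pvM = Fm 3
      norm_num [mod_eq, Fm, pvM]
    · show PySem.Int.mod (3 * 1 + -1) pvM = Dm 3
      norm_num [mod_eq, Dm, pvM]
    · norm_num
  | succ k ih =>
    rw [show ((k + 1 : Nat) : Int) + 4 = ((k : Int) + 4) + 1 by push_cast; ring,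
      PySem.List.pyRange_one_succ_right (by omega : (3:Int) ≤ (k : Int) + 4),
      List.foldl_append, ih, List.foldl_cons, List.foldl_nil]
    refine Prod.ext ?_ (Prod.ext ?_ ?_)
    · show PySem.Int.mod (Fm (k + 3) * ((k : Int) + 4)) pvM = Fm (k + 4)
      rw [mod_eq]
      show _ = (Fm (k + 3) * (((k + 3 : Nat) : Int) + 1)) % pvM
      push_cast; ring_nf
    · show PySem.Int.mod (((k : Int) + 4) * Dm (k + 3) + -(-1) ^ (k + 3)) pvM = Dm (k + 4)
      rw [mod_eq]
      show _ = ((((k + 3 : Nat) : Int) + 1) * Dm (k + 3) + (-1) ^ (k + 3 + 1)) % pvM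
      push_cast; ring_nf
    · show -(-1 : Int) ^ (k + 3) = (-1) ^ (k + 1 + 3)
      rw [show k + 1 + 3 = (k + 3) + 1 from rfl, pow_succ]; ring

-- A's loop body and loop state, named for the invariant proof (pvStep is the port's lambda verbatim)
def pvStep (st : Array Int × Array Int) (i : Int) : Array Int × Array Int :=
  let a := st.1.getD i.toNat 0
  let b := st.2.getD i.toNat 0
  (st.1.setIfInBounds (i + 1).toNat (PySem.Int.mod (i * a + b) pvM),
   st.2.setIfInBounds (i + 1).toNat (PySem.Int.mod (i * a) pvM))

def pvI (n : Nat) : Array Int :=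
  (((PySem.List.pyRange 0 ((n : Int) + 1) 1).map (fun _ => 0)).toArray).setIfInBounds 2 1

def pvSt (n m : Nat) : Array Int × Array Int :=
  (PySem.List.pyRange 2 ((m : Int) + 2) 1).foldl pvStep (pvI n, pvI n)

lemma aGetD_set_self (xs : Array Int) (k : Nat) (v d : Int) (h : k < xs.size) :
    (xs.setIfInBounds k v).getD k d = v := by
  simp [Array.getD, h]

lemma size_pvI (n : Nat) : (pvI n).size = n + 1 := by
  simp [pvI, PySem.List.length_pyRange_one]

lemma getD_pvI_two (n : Nat) (hn : 2 ≤ n) : (pvI n).getD 2 0 = 1 := by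
  unfold pvI
  exact aGetD_set_self _ 2 1 0 (by simp [PySem.List.length_pyRange_one]; omega)

-- A's list entry A[k] (k ≥ 2) as a function of Bm
def Av (k : Nat) : Int := (Bm k + Bm (k - 1)) % pvM

lemma modM_mul_add (c x v : Int) : (c * (x % pvM) + v) % pvM = (c * x + v) % pvM := by
  rw [← Int.emod_add_emod (c * (x % pvM)) pvM v, modM_mul_right]
  exact Int.emod_add_emod _ _ _

lemma valA (m : Nat) :
    PySem.Int.mod (((m : Int) + 2) * Av (m + 2) + Bm (m + 2)) pvM = Av (m + 3) := by
  rw [mod_eq]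
  show (((m : Int) + 2) * ((Bm (m + 2) + Bm (m + 1)) % pvM) + Bm (m + 2)) % pvM = _
  rw [modM_mul_add]
  show _ = (Bm (m + 3) + Bm (m + 2)) % pvM
  rw [show Bm (m + 3) = (((m : Int) + 2) * (Bm (m + 2) + Bm (m + 1))) % pvM from rfl,
    modM_add_left]

lemma valB (m : Nat) :
    PySem.Int.mod (((m : Int) + 2) * Av (m + 2)) pvM = Bm (m + 3) := by
  rw [mod_eq]
  show (((m : Int) + 2) * ((Bm (m + 2) + Bm (m + 1)) % pvM)) % pvM = _
  rw [modM_mul_right]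
  rfl

-- the loop invariant: after processing range(2, m+2) the two arrays have size n+1 and
-- carry Av/Bm at index m+2
lemma arr_fold (n m : Nat) (hm : m + 2 ≤ n) :
    (pvSt n m).1.size = n + 1 ∧ (pvSt n m).2.size = n + 1 ∧
    (pvSt n m).1.getD (m + 2) 0 = Av (m + 2) ∧
    (pvSt n m).2.getD (m + 2) 0 = Bm (m + 2) := by
  induction m with
  | zero =>
    have hs : pvSt n 0 = (pvI n, pvI n) := by
      unfold pvSt
      rw [show ((0 : Nat) : Int) + 2 = 2 by norm_num, PySem.List.pyRange_one_eq_nil le_rfl]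
      rfl
    rw [hs]
    refine ⟨size_pvI n, size_pvI n, ?_, ?_⟩
    · rw [show (0 : Nat) + 2 = 2 from rfl, getD_pvI_two n (by omega)]
      norm_num [Av, Bm, pvM]
    · rw [show (0 : Nat) + 2 = 2 from rfl, getD_pvI_two n (by omega)]
      rfl
  | succ k ih =>
    obtain ⟨h1, h2, h3, h4⟩ := ih (by omega)
    have hstep : pvSt n (k + 1) = pvStep (pvSt n k) ((k : Int) + 2) := by
      unfold pvSt
      rw [show ((k + 1 : Nat) : Int) + 2 = ((k : Int) + 2) + 1 by push_cast; ring,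
        PySem.List.pyRange_one_succ_right (by omega), List.foldl_append]
      rfl
    rw [hstep]
    unfold pvStep
    rw [show ((k : Int) + 2).toNat = k + 2 by omega,
      show ((k : Int) + 2 + 1).toNat = k + 3 by omega, h3, h4]
    refine ⟨by simp [Array.size_setIfInBounds, h1], by simp [Array.size_setIfInBounds, h2], ?_, ?_⟩
    · rw [show k + 1 + 2 = k + 3 from rfl, aGetD_set_self _ _ _ _ (by rw [h1]; omega)]
      exact valA k
    · rw [show k + 1 + 2 = k + 3 from rfl, aGetD_set_self _ _ _ _ (by rw [h2]; omega)]
      exact valB k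

lemma main_eq (m : Nat) : solution ((m : Int) + 3) = solution_alt ((m : Int) + 3) := by
  have h1 : ¬ ((m : Int) + 3 = 1) := by omega
  have h2 : ¬ ((m : Int) + 3 = 2) := by omega
  simp only [solution, solution_alt, if_neg h1, if_neg h2]
  rw [show (1000000007 : Int) = pvM from rfl]
  -- B side: the fused fold computes (Fm (m+3), Dm (m+3), (-1)^(m+3))
  have hf := fused_fold m
  rw [show ((m : Int) + 3 + 1) = (m : Int) + 4 by ring, hf]
  -- A side: factorial part equals Fm (m+3)
  have hne : PySem.List.pyRange 2 ((m : Int) + 3 + 1) 1 ≠ [] := by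
    rw [PySem.List.pyRange_one_cons (by omega)]; simp
  have hrev : PySem.List.pyRange ((m : Int) + 3) 1 (-1)
      = (PySem.List.pyRange 2 ((m : Int) + 3 + 1) 1).reverse := by
    have := PySem.List.pyRange_neg_one_eq_reverse ((m : Int) + 3) 1
    simpa using this
  have hred : (PySem.List.pyRange ((m : Int) + 3) 1 (-1)).foldl
        (fun c i => PySem.Int.mod (c * i) pvM) 1 = Fm (m + 3) := by
    rw [hrev, foldl_mulmod _ _ (by simpa using hne), List.prod_reverse, one_mul,
      Fm_eq_prod (m + 3) (by omega),
      show ((m + 3 : Nat) : Int) + 1 = (m : Int) + 3 + 1 by push_cast; ring]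
  rw [hred]
  -- A side: array part — B[N] = Bm (m+3) = Dm (m+3)
  have hst : (PySem.List.pyRange 2 ((m : Int) + 3) 1).foldl
        (fun (st : Array Int × Array Int) i =>
          let a := st.1.getD i.toNat 0
          let b := st.2.getD i.toNat 0
          (st.1.setIfInBounds (i + 1).toNat (PySem.Int.mod (i * a + b) pvM),
           st.2.setIfInBounds (i + 1).toNat (PySem.Int.mod (i * a) pvM)))
        (pvI (m + 3), pvI (m + 3))
      = pvSt (m + 3) (m + 1) := by
    unfold pvSt pvStep
    rw [show ((m + 1 : Nat) : Int) + 2 = (m : Int) + 3 by push_cast; ring]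
  have harr := arr_fold (m + 3) (m + 1) (by omega)
  have hI : pvI (m + 3)
      = (((PySem.List.pyRange 0 ((m : Int) + 4) 1).map (fun _ => 0)).toArray).setIfInBounds 2 1 := by
    unfold pvI
    rw [show ((m + 3 : Nat) : Int) + 1 = (m : Int) + 4 by push_cast; ring]
  rw [← hI, hst, show ((m : Int) + 3).toNat = m + 3 by omega]
  have hb : (pvSt (m + 3) (m + 1)).2.getD (m + 3) 0 = Bm (m + 3) := harr.2.2.2
  rw [hb, (Bm_eq_Dm (m + 1)).2]

-- ===== VERDICT (by name: the statement is the Claim_ definition above) =====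
theorem solution_spec : Claim_equal_solution := by
  intro N _ hpre
  unfold Spec_solution
  by_cases h1 : N = 1
  · subst h1; rfl
  by_cases h2 : N = 2
  · subst h2; rfl
  obtain ⟨m, rfl⟩ : ∃ m : Nat, N = (m : Int) + 3 :=
    ⟨(N - 3).toNat, by unfold Pre_solution at hpre; omega⟩
  exact main_eq m
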